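-- pv_equiv track=rewrite | github.com/jsmccabe1/SCEPTR | scripts/validate_category_keywords.py | keyword_matches_vocabulary
-- ===== SOURCE A (Python) =====
-- def keyword_matches_vocabulary(keyword, vocabulary):
--     """Multi-strategy keyword-to-GO matching."""
--     kw_lower = keyword.lower()
--     if kw_lower in vocabulary:
--         return "exact", kw_lower
--     for term in vocabulary:
--         if kw_lower in term:
--             return "substring_of_go", term
--     for term in vocabulary:
--         if len(term) >= 4 and term in kw_lower:
--             return "go_substring_of_kw", term
--     return None, None
-- ===== SOURCE B (Python) =====
-- def keyword_matches_vocabulary(keyword, vocabulary):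
--     """Bounded argmin matching: rank terms 0/1/2, keep the best, prune tests that cannot improve it."""
--     kw = keyword.lower()
--     names = ("exact", "substring_of_go", "go_substring_of_kw")
--     best = None   # (rank, term); terms are visited in order, so only a strictly
--     bound = 3     # smaller rank than `bound` (the best rank so far) can improve
--     for term in vocabulary:
--         if bound == 0:
--             break
--         if term == kw:
--             rank = 0
--         elif bound >= 2 and kw in term:
--             rank = 1
--         elif bound >= 3 and len(term) >= 4 and term in kw:
--             rank = 2
--         else:
--             continue
--         best = (rank, term)
--         bound = rank
--     if best is None:
--         return None, None
--     return names[best[0]], best[1]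
-- ===== Notes on version B (the rewrite author's own statement) =====
-- stated objective: alternative
-- what changed: A's priority-ordered early-return passes are replaced by a single bounded-argmin scan: every term gets a strategy rank (0/1/2), the best (lowest-rank, earliest) pair is kept, rank tests that cannot beat the current best are pruned, and the strategy name is looked up in a table at the end.
import Mathlib
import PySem

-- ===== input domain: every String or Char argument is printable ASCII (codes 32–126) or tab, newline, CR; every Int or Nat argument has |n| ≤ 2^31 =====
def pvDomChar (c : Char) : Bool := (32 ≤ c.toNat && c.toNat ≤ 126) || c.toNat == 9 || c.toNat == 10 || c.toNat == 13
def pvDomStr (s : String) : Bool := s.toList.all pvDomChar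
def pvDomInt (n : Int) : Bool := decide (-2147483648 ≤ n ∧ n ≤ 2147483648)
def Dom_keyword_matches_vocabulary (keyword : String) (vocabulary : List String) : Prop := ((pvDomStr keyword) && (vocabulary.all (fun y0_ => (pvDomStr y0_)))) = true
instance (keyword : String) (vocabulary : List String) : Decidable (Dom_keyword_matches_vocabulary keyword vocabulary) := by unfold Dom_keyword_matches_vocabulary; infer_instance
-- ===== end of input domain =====

-- B replaces A's priority-ordered early-return passes by one bounded-argmin scan over
-- ranked terms ("alternative": different algorithm, comparable cost).

-- ===== PORT A =====
-- first `for term in vocabulary: if kw_lower in term: return ...` loop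
def kmvLoopSub (kw : String) : List String → Option String
  | [] => none
  | t :: rest => if PySem.Str.isIn kw t then some t else kmvLoopSub kw rest

-- second `for term in vocabulary: if len(term) >= 4 and term in kw_lower: return ...` loop
def kmvLoopSup (kw : String) : List String → Option String
  | [] => none
  | t :: rest => if PySem.Str.len t ≥ 4 && PySem.Str.isIn t kw then some t else kmvLoopSup kw rest

def keyword_matches_vocabulary (keyword : String) (vocabulary : List String) : Option String × Option String :=
  -- kw_lower = keyword.lower()  (pure, written inline below)
  if vocabulary.contains (PySem.Str.lower keyword) then (some "exact", some (PySem.Str.lower keyword))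
  else match kmvLoopSub (PySem.Str.lower keyword) vocabulary with
    | some t => (some "substring_of_go", some t)
    | none =>
      match kmvLoopSup (PySem.Str.lower keyword) vocabulary with
      | some t => (some "go_substring_of_kw", some t)
      | none => (none, none)

-- ===== PORT B =====
-- Source B's loop: state = (bound, best); the if/elif rank chain is the inner match
def kmvScan (kw : String) : List String → Nat → Option (Nat × String) → Option (Nat × String)
  | [], _, best => best
  | t :: rest, bound, best =>
    if bound == 0 then best
    else
      match (if t == kw then some 0
             else if decide (bound ≥ 2) && PySem.Str.isIn kw t then some 1
             else if decide (bound ≥ 3) && (PySem.Str.len t ≥ 4 && PySem.Str.isIn t kw) then some 2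
             else none : Option Nat) with
      | some r => kmvScan kw rest r (some (r, t))
      | none => kmvScan kw rest bound best

def keyword_matches_vocabulary_alt (keyword : String) (vocabulary : List String) : Option String × Option String :=
  -- kw = keyword.lower(); names = ("exact", "substring_of_go", "go_substring_of_kw")  (pure, inline)
  match kmvScan (PySem.Str.lower keyword) vocabulary 3 none with
  | none => (none, none)
  | some (r, t) => ((["exact", "substring_of_go", "go_substring_of_kw"] : List String)[r]?, some t)

-- ===== PRECONDITION & SPEC =====
def Spec_keyword_matches_vocabulary (keyword : String) (vocabulary : List String) (out : Option String × Option String) : Prop := out = keyword_matches_vocabulary_alt keyword vocabulary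
instance (keyword : String) (vocabulary : List String) (out : Option String × Option String) : Decidable (Spec_keyword_matches_vocabulary keyword vocabulary out) := by unfold Spec_keyword_matches_vocabulary; infer_instance

-- ===== CLAIM (what is proved, stated in full; the proofs are below) =====
def Claim_equal_keyword_matches_vocabulary : Prop := ∀ (keyword : String) (vocabulary : List String), Dom_keyword_matches_vocabulary keyword vocabulary → Spec_keyword_matches_vocabulary keyword vocabulary (keyword_matches_vocabulary keyword vocabulary)

-- ===== LEMMAS AND PROOFS =====

theorem kmvScan_zero (kw : String) (v : List String) (best : Option (Nat × String)) :
    kmvScan kw v 0 best = best := by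
  cases v <;> simp [kmvScan]

theorem kmvScan_one (kw bt : String) (v : List String) :
    kmvScan kw v 1 (some (1, bt)) = if v.contains kw then some (0, kw) else some (1, bt) := by
  induction v with
  | nil => rfl
  | cons t rest ih =>
    by_cases h0 : t = kw
    · subst h0; simp [kmvScan, kmvScan_zero]
    · simp [kmvScan, h0, Ne.symm h0, ih]

theorem kmvScan_two (kw bt : String) (v : List String) :
    kmvScan kw v 2 (some (2, bt)) =
      if v.contains kw then some (0, kw)
      else match kmvLoopSub kw v with
        | some u => some (1, u)
        | none => some (2, bt) := by
  induction v with
  | nil => rfl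
  | cons t rest ih =>
    by_cases h0 : t = kw
    · subst h0; simp [kmvScan, kmvScan_zero]
    · by_cases h1 : PySem.Chars.isIn kw.toList t.toList = true
      · simp [kmvScan, kmvLoopSub, h0, h1, Ne.symm h0, kmvScan_one]
      · simp only [kmvScan, kmvLoopSub]
        simp [h0, h1, Ne.symm h0, ih]

theorem kmvScan_top (kw : String) (v : List String) :
    kmvScan kw v 3 none =
      if v.contains kw then some (0, kw)
      else match kmvLoopSub kw v with
        | some u => some (1, u)
        | none =>
          match kmvLoopSup kw v with
          | some u => some (2, u)
          | none => none := by
  induction v with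
  | nil => rfl
  | cons t rest ih =>
    by_cases h0 : t = kw
    · subst h0; simp [kmvScan, kmvScan_zero]
    · by_cases h1 : PySem.Chars.isIn kw.toList t.toList = true
      · simp [kmvScan, kmvLoopSub, h0, h1, Ne.symm h0, kmvScan_one]
      · by_cases h2 : (4 ≤ t.length ∧ PySem.Chars.isIn t.toList kw.toList = true)
        · simp only [kmvScan, kmvLoopSub, kmvLoopSup]
          simp [h0, h1, h2, Ne.symm h0, kmvScan_two]
        · simp only [kmvScan, kmvLoopSub, kmvLoopSup]
          simp [h0, h1, h2, Ne.symm h0, ih]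

-- ===== VERDICT (by name: the statement is the Claim_ definition above) =====
theorem keyword_matches_vocabulary_spec : Claim_equal_keyword_matches_vocabulary := by
  intro keyword vocabulary _
  unfold Spec_keyword_matches_vocabulary keyword_matches_vocabulary keyword_matches_vocabulary_alt
  have h := kmvScan_top (PySem.Str.lower keyword) vocabulary
  rw [h]
  cases hc : vocabulary.contains (PySem.Str.lower keyword) with
  | true => simp
  | false =>
    cases h1 : kmvLoopSub (PySem.Str.lower keyword) vocabulary with
    | some u => simp
    | none =>
      cases h2 : kmvLoopSup (PySem.Str.lower keyword) vocabulary with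
      | some u => simp
      | none => simp
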